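-- pv_equiv track=rewrite | github.com/Summerok/trainingPython | labyrinth/resources/carte.py | creer_labyrinthe_depuis_chaine
-- ===== SOURCE A (Python) =====
-- def creer_labyrinthe_depuis_chaine(chaine):
--     """Decode carte in a dictionary data structure with 2 axis (x, y)
--     starting by (0, 0)"""
--     labyLoad = {}
--     y = 0
--     x = 0
--     for obj in chaine:
--         if obj == "\n":
--             labyLoad[x, y] = obj
--             y += 1
--             x = 0
--         else:
--             labyLoad[x, y] = obj
--             x += 1
--     return labyLoad
-- ===== SOURCE B (Python) =====
-- def creer_labyrinthe_depuis_chaine(chaine):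
--     """Decode carte in a dictionary data structure with 2 axis (x, y)
--     starting by (0, 0)"""
--     laby = {}
--     lines = chaine.split("\n")
--     y = 0
--     for line in lines[:-1]:
--         for x, obj in enumerate(line):
--             laby[x, y] = obj
--         laby[len(line), y] = "\n"
--         y += 1
--     for x, obj in enumerate(lines[-1]):
--         laby[x, y] = obj
--     return laby
-- ===== Notes on version B (the rewrite author's own statement) =====
-- stated objective: alternative
-- what changed: B first splits the string on newlines, then fills the dict with a nested pass (enumerate over each non-final line plus a re-inserted newline entry, then the last line), instead of A's single flat pass over characters with manually maintained x/y counters.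
import Mathlib
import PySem

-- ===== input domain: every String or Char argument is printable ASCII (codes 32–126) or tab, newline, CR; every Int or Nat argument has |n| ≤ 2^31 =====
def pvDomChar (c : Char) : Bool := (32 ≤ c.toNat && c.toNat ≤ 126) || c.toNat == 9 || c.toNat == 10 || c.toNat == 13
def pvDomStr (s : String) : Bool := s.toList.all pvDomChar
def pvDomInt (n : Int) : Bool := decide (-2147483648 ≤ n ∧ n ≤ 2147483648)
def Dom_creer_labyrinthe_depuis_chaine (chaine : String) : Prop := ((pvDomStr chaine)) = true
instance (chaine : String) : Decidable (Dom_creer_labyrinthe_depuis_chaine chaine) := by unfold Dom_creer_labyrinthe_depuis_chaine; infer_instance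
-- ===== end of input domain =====

-- B replaces A's flat character pass (manual x/y counters) by split-on-newline followed by a
-- nested enumerate pass; same O(n) cost, different decomposition.

-- ===== PORT A =====
def creer_labyrinthe_depuis_chaine (chaine : String) : List (Int × Int × String) :=
  let st := chaine.toList.foldl
      (fun (st : PySem.Dict (Int × Int) String × Int × Int) obj =>
        let labyLoad := st.1
        let y := st.2.1
        let x := st.2.2
        if obj = '\n' then (labyLoad.insert (x, y) "\n", y + 1, 0)
        else (labyLoad.insert (x, y) (String.singleton obj), y, x + 1))
      (PySem.Dict.empty, 0, 0)
  st.1.items.map (fun p => (p.1.1, p.1.2, p.2))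

-- ===== PORT B =====
def creer_labyrinthe_depuis_chaine_alt (chaine : String) : List (Int × Int × String) :=
  let lines := PySem.Chars.splitOn chaine.toList ['\n']
  let st := (PySem.List.slice lines none (some (-1))).foldl
      (fun (st : PySem.Dict (Int × Int) String × Int) line =>
        let laby := (PySem.List.enumerate line 0).foldl
            (fun (d : PySem.Dict (Int × Int) String) (p : Int × Char) =>
              d.insert (p.1, st.2) (String.singleton p.2)) st.1
        (laby.insert ((line.length : Int), st.2) "\n", st.2 + 1))
      (PySem.Dict.empty, 0)
  -- lines[-1]: str.split never returns an empty list, so the -1 lookup is exact with any default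
  let laby := (PySem.List.enumerate (PySem.List.pyGetD lines (-1) []) 0).foldl
      (fun (d : PySem.Dict (Int × Int) String) (p : Int × Char) =>
        d.insert (p.1, st.2) (String.singleton p.2)) st.1
  laby.items.map (fun p => (p.1.1, p.1.2, p.2))

-- ===== PRECONDITION & SPEC =====
def Spec_creer_labyrinthe_depuis_chaine (chaine : String) (out : List (Int × Int × String)) : Prop := out = creer_labyrinthe_depuis_chaine_alt chaine
instance (chaine : String) (out : List (Int × Int × String)) : Decidable (Spec_creer_labyrinthe_depuis_chaine chaine out) := by unfold Spec_creer_labyrinthe_depuis_chaine; infer_instance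

-- ===== CLAIM (what is proved, stated in full; the proofs are below) =====
def Claim_equal_creer_labyrinthe_depuis_chaine : Prop := ∀ (chaine : String), Dom_creer_labyrinthe_depuis_chaine chaine → Spec_creer_labyrinthe_depuis_chaine chaine (creer_labyrinthe_depuis_chaine chaine)

-- ===== LEMMAS AND PROOFS =====

-- named copies (definitionally equal) of the loop bodies of the two ports
def pvStepA (st : PySem.Dict (Int × Int) String × Int × Int) (obj : Char) :
    PySem.Dict (Int × Int) String × Int × Int :=
  if obj = '\n' then (st.1.insert (st.2.2, st.2.1) "\n", st.2.1 + 1, 0)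
  else (st.1.insert (st.2.2, st.2.1) (String.singleton obj), st.2.1, st.2.2 + 1)

def pvInnerF (y : Int) (d : PySem.Dict (Int × Int) String) (p : Int × Char) :
    PySem.Dict (Int × Int) String :=
  d.insert (p.1, y) (String.singleton p.2)

def pvOuterF (st : PySem.Dict (Int × Int) String × Int) (line : List Char) :
    PySem.Dict (Int × Int) String × Int :=
  (((PySem.List.enumerate line 0).foldl (pvInnerF st.2) st.1).insert
      ((line.length : Int), st.2) "\n", st.2 + 1)

-- entries of one line of characters, x increasing from the given start
def pvLineEnts (x y : Int) : List Char → List ((Int × Int) × String)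
  | [] => []
  | c :: r => ((x, y), String.singleton c) :: pvLineEnts (x + 1) y r

-- entries produced by A's flat pass starting at (x, y)
def pvFlat (x y : Int) : List Char → List ((Int × Int) × String)
  | [] => []
  | c :: r =>
      if c = '\n' then ((x, y), "\n") :: pvFlat 0 (y + 1) r
      else ((x, y), String.singleton c) :: pvFlat (x + 1) y r

-- reference split on '\n' (pre = chars of the current piece so far)
def pvSplitNl (pre : List Char) : List Char → List (List Char)
  | [] => [pre]
  | c :: r => if c = '\n' then pre :: pvSplitNl [] r else pvSplitNl (pre ++ [c]) r

-- entries of the non-final lines (each followed by its newline entry)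
def pvBodyEnts (y : Int) : List (List Char) → List ((Int × Int) × String)
  | [] => []
  | l :: ls => pvLineEnts 0 y l ++ [(((l.length : Int), y), "\n")] ++ pvBodyEnts (y + 1) ls

-- entries of a full list of lines (no newline entry after the last)
def pvEncLines (y : Int) : List (List Char) → List ((Int × Int) × String)
  | [] => []
  | [l] => pvLineEnts 0 y l
  | l :: ls => pvLineEnts 0 y l ++ [(((l.length : Int), y), "\n")] ++ pvEncLines (y + 1) ls

theorem pvSplitNl_ne_nil (cs pre : List Char) : pvSplitNl pre cs ≠ [] := by
  induction cs generalizing pre with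
  | nil => simp [pvSplitNl]
  | cons c r ih => simp only [pvSplitNl]; split <;> simp [ih]

theorem pvSplitOn_go_eq (fuel : Nat) (l cur : List Char) (acc : List (List Char))
    (h : l.length < fuel) :
    PySem.Chars.splitOn.go ['\n'] fuel l cur acc = acc.reverse ++ pvSplitNl cur.reverse l := by
  induction fuel generalizing l cur acc with
  | zero => omega
  | succ fuel ih =>
    cases l with
    | nil => simp [PySem.Chars.splitOn.go, pvSplitNl]
    | cons c r =>
      simp only [List.length_cons] at h
      by_cases hc : c = '\n'
      · subst hc
        simp only [PySem.Chars.splitOn.go, List.isPrefixOf, pvSplitNl]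
        simp [ih r [] (cur.reverse :: acc) (by omega)]
      · have hb : List.isPrefixOf ['\n'] (c :: r) = false := by
          simp only [List.isPrefixOf, Bool.and_true]
          simp only [beq_eq_false_iff_ne, ne_eq]
          exact fun h' => hc h'.symm
        rw [show PySem.Chars.splitOn.go ['\n'] (fuel + 1) (c :: r) cur acc
              = PySem.Chars.splitOn.go ['\n'] fuel r (c :: cur) acc by
            simp only [PySem.Chars.splitOn.go]
            rw [if_neg (by simp [hb])]]
        rw [ih r (c :: cur) acc (by omega)]
        simp [pvSplitNl, hc]

theorem pvSplitOn_eq (cs : List Char) :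
    PySem.Chars.splitOn cs ['\n'] = pvSplitNl [] cs := by
  have := pvSplitOn_go_eq (cs.length + 1) cs [] [] (by omega)
  simpa [PySem.Chars.splitOn] using this

theorem pvLineEnts_append (pre : List Char) (c : Char) (x y : Int) :
    pvLineEnts x y (pre ++ [c]) =
      pvLineEnts x y pre ++ [((x + (pre.length : Int), y), String.singleton c)] := by
  induction pre generalizing x with
  | nil => simp [pvLineEnts]
  | cons a r ih =>
    simp only [List.cons_append, pvLineEnts, ih (x + 1), List.length_cons]
    have : x + 1 + (r.length : Int) = x + ((r.length : Int) + 1) := by ring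
    rw [this]
    norm_cast

theorem pvEncLines_splitNl (cs pre : List Char) (y : Int) :
    pvEncLines y (pvSplitNl pre cs) = pvLineEnts 0 y pre ++ pvFlat (pre.length : Int) y cs := by
  induction cs generalizing pre y with
  | nil => simp [pvSplitNl, pvEncLines, pvFlat]
  | cons c r ih =>
    by_cases hc : c = '\n'
    · subst hc
      rw [show pvSplitNl pre ('\n' :: r) = pre :: pvSplitNl [] r by simp [pvSplitNl]]
      rw [show pvFlat (pre.length : Int) y ('\n' :: r)
            = (((pre.length : Int), y), "\n") :: pvFlat 0 (y + 1) r by simp [pvFlat]]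
      have hne := pvSplitNl_ne_nil r ([] : List Char)
      obtain ⟨l, ls, hl⟩ : ∃ l ls, pvSplitNl ([] : List Char) r = l :: ls := by
        cases h : pvSplitNl ([] : List Char) r with
        | nil => exact absurd h hne
        | cons l ls => exact ⟨l, ls, rfl⟩
      rw [show pvEncLines y (pre :: pvSplitNl [] r) = pvLineEnts 0 y pre ++
            [(((pre.length : Int), y), "\n")] ++ pvEncLines (y + 1) (pvSplitNl [] r) by
          rw [hl]; rfl]
      rw [ih [] (y + 1)]
      simp [pvLineEnts]
    · rw [show pvSplitNl pre (c :: r) = pvSplitNl (pre ++ [c]) r by simp [pvSplitNl, hc]]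
      rw [show pvFlat (pre.length : Int) y (c :: r)
            = (((pre.length : Int), y), String.singleton c) :: pvFlat ((pre.length : Int) + 1) y r by
          simp [pvFlat, hc]]
      rw [ih (pre ++ [c]) y, pvLineEnts_append]
      simp

theorem pvEncLines_decomp (ls : List (List Char)) (y : Int) (h : ls ≠ []) :
    pvEncLines y ls =
      pvBodyEnts y ls.dropLast ++ pvLineEnts 0 (y + (ls.dropLast.length : Int)) (ls.getLast h) := by
  induction ls generalizing y with
  | nil => exact absurd rfl h
  | cons l ls ih =>
    cases ls with
    | nil => simp [pvEncLines, pvBodyEnts]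
    | cons l' ls' =>
      rw [show pvEncLines y (l :: l' :: ls') = pvLineEnts 0 y l ++
            [(((l.length : Int), y), "\n")] ++ pvEncLines (y + 1) (l' :: ls') from rfl]
      rw [ih (y + 1) (by simp)]
      simp only [List.dropLast_cons_of_ne_nil (by simp : (l' :: ls') ≠ []),
        List.getLast_cons (by simp : (l' :: ls') ≠ []), pvBodyEnts, List.length_cons]
      simp only [List.append_assoc]
      have : y + 1 + ((l' :: ls').dropLast.length : Int)
          = y + (((l' :: ls').dropLast.length : Int) + 1) := by ring
      rw [this]
      norm_cast

-- a key absent from the items is not contained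
theorem pvNotContains (d : PySem.Dict (Int × Int) String) (k : Int × Int)
    (h : ∀ p ∈ d.items, p.1 ≠ k) : d.contains k = false := by
  by_contra hc
  have hc' : d.contains k = true := by
    cases hcc : d.contains k
    · exact absurd hcc hc
    · rfl
  have hk : k ∈ d.keys := (PySem.Dict.contains_iff_mem_keys d k).mp hc'
  simp only [PySem.Dict.keys, List.mem_map] at hk
  obtain ⟨p, hp, hpk⟩ := hk
  exact h p hp hpk

theorem pvLineEnts_key (l : List Char) (x y : Int) (p : (Int × Int) × String)
    (hp : p ∈ pvLineEnts x y l) : p.1.2 = y ∧ x ≤ p.1.1 ∧ p.1.1 < x + (l.length : Int) := by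
  induction l generalizing x with
  | nil => simp [pvLineEnts] at hp
  | cons c r ih =>
    simp only [pvLineEnts, List.mem_cons] at hp
    cases hp with
    | inl h =>
      subst h
      refine ⟨rfl, le_refl x, ?_⟩
      show x < x + ((r.length + 1 : Nat) : Int)
      push_cast
      omega
    | inr h =>
      have := ih (x + 1) h
      simp only [List.length_cons]
      push_cast
      omega

theorem pvBodyEnts_key (ls : List (List Char)) (y : Int) (p : (Int × Int) × String)
    (hp : p ∈ pvBodyEnts y ls) : y ≤ p.1.2 ∧ p.1.2 < y + (ls.length : Int) := by
  induction ls generalizing y with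
  | nil => simp [pvBodyEnts] at hp
  | cons l rest ih =>
    simp only [pvBodyEnts, List.append_assoc, List.mem_append, List.mem_cons] at hp
    simp only [List.length_cons]
    rcases hp with h | h | h
    · have := pvLineEnts_key l 0 y p h
      push_cast
      omega
    · rcases h with h | h
      · subst h
        refine ⟨le_refl y, ?_⟩
        show y < y + ((rest.length + 1 : Nat) : Int)
        push_cast
        omega
      · simp at h
    · have := ih (y + 1) h
      push_cast
      omega

-- A's loop appends pvFlat entries, given every existing key is strictly earlier
theorem pvFoldA (cs : List Char) (d : PySem.Dict (Int × Int) String) (x y : Int)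
    (h : ∀ p ∈ d.items, p.1.2 < y ∨ (p.1.2 = y ∧ p.1.1 < x)) :
    (cs.foldl pvStepA (d, y, x)).1.items = d.items ++ pvFlat x y cs := by
  induction cs generalizing d x y with
  | nil => simp [pvFlat]
  | cons c r ih =>
    have hnc : d.contains (x, y) = false := by
      apply pvNotContains
      intro p hp hpk
      rcases h p hp with h1 | ⟨h1, h2⟩
      · rw [hpk] at h1; exact absurd h1 (lt_irrefl y)
      · rw [hpk] at h2; exact absurd h2 (lt_irrefl x)
    have hins : ∀ v, (d.insert (x, y) v).items = d.items ++ [((x, y), v)] :=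
      fun v => PySem.Dict.items_insert_of_not_contains d v hnc
    simp only [List.foldl_cons, pvFlat]
    by_cases hc : c = '\n'
    · subst hc
      rw [show pvStepA (d, y, x) '\n' = (d.insert (x, y) "\n", y + 1, 0) by
          simp [pvStepA]]
      rw [if_pos rfl]
      rw [ih (d.insert (x, y) "\n") 0 (y + 1) ?_]
      · rw [hins]; simp
      · intro p hp
        rw [hins] at hp
        simp only [List.mem_append, List.mem_singleton] at hp
        rcases hp with hp | hp
        · rcases h p hp with h1 | ⟨h1, _⟩ <;> left <;> omega
        · subst hp; left; simp
    · rw [show pvStepA (d, y, x) c = (d.insert (x, y) (String.singleton c), y, x + 1) by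
          simp [pvStepA, hc]]
      rw [if_neg hc]
      rw [ih (d.insert (x, y) (String.singleton c)) (x + 1) y ?_]
      · rw [hins]; simp
      · intro p hp
        rw [hins] at hp
        simp only [List.mem_append, List.mem_singleton] at hp
        rcases hp with hp | hp
        · rcases h p hp with h1 | ⟨h1, h2⟩
          · left; exact h1
          · right; exact ⟨h1, by omega⟩
        · subst hp; right; simp

-- B's inner enumerate loop appends pvLineEnts entries
theorem pvFoldInner (l : List Char) (s : Int) (d : PySem.Dict (Int × Int) String) (y : Int)
    (h : ∀ p ∈ d.items, p.1.2 < y ∨ (p.1.2 = y ∧ p.1.1 < s)) :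
    ((PySem.List.enumerate l s).foldl (pvInnerF y) d).items = d.items ++ pvLineEnts s y l := by
  induction l generalizing s d with
  | nil => simp [PySem.List.enumerate_nil, pvLineEnts]
  | cons c r ih =>
    have hnc : d.contains (s, y) = false := by
      apply pvNotContains
      intro p hp hpk
      rcases h p hp with h1 | ⟨h1, h2⟩
      · rw [hpk] at h1; exact absurd h1 (lt_irrefl y)
      · rw [hpk] at h2; exact absurd h2 (lt_irrefl s)
    have hins : (d.insert (s, y) (String.singleton c)).items
        = d.items ++ [((s, y), String.singleton c)] :=
      PySem.Dict.items_insert_of_not_contains d _ hnc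
    rw [PySem.List.enumerate_cons]
    simp only [List.foldl_cons]
    rw [show pvInnerF y d (s, c) = d.insert (s, y) (String.singleton c) from rfl]
    rw [ih (s + 1) (d.insert (s, y) (String.singleton c)) ?_]
    · rw [hins]; simp [pvLineEnts]
    · intro p hp
      rw [hins] at hp
      simp only [List.mem_append, List.mem_singleton] at hp
      rcases hp with hp | hp
      · rcases h p hp with h1 | ⟨h1, h2⟩
        · left; exact h1
        · right; exact ⟨h1, by omega⟩
      · subst hp; right; simp

-- B's outer loop over the non-final lines appends pvBodyEnts entries and advances y
theorem pvFoldOuter (ls : List (List Char)) (d : PySem.Dict (Int × Int) String) (y : Int)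
    (h : ∀ p ∈ d.items, p.1.2 < y) :
    (ls.foldl pvOuterF (d, y)).1.items = d.items ++ pvBodyEnts y ls
    ∧ (ls.foldl pvOuterF (d, y)).2 = y + (ls.length : Int) := by
  induction ls generalizing d y with
  | nil => simp [pvBodyEnts]
  | cons l rest ih =>
    simp only [List.foldl_cons]
    have hinner := pvFoldInner l 0 d y (fun p hp => Or.inl (h p hp))
    set d1 := (PySem.List.enumerate l 0).foldl (pvInnerF y) d with hd1
    have hd1items : d1.items = d.items ++ pvLineEnts 0 y l := hinner
    have hd1below : ∀ p ∈ d1.items, p.1.2 < y ∨ (p.1.2 = y ∧ p.1.1 < (l.length : Int)) := by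
      intro p hp
      rw [hd1items] at hp
      simp only [List.mem_append] at hp
      rcases hp with hp | hp
      · left; exact h p hp
      · have := pvLineEnts_key l 0 y p hp
        right; exact ⟨this.1, by omega⟩
    have hnc : d1.contains ((l.length : Int), y) = false := by
      apply pvNotContains
      intro p hp hpk
      rcases hd1below p hp with h1 | ⟨h1, h2⟩
      · rw [hpk] at h1; exact absurd h1 (lt_irrefl y)
      · rw [hpk] at h2; exact absurd h2 (lt_irrefl _)
    have hins : (d1.insert ((l.length : Int), y) "\n").items
        = d1.items ++ [(((l.length : Int), y), "\n")] :=
      PySem.Dict.items_insert_of_not_contains d1 _ hnc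
    have hbelow2 : ∀ p ∈ (d1.insert ((l.length : Int), y) "\n").items, p.1.2 < y + 1 := by
      intro p hp
      rw [hins] at hp
      simp only [List.mem_append, List.mem_singleton] at hp
      rcases hp with hp | hp
      · rcases hd1below p hp with h1 | ⟨h1, _⟩ <;> omega
      · subst hp; simp
    obtain ⟨hitems, hsnd⟩ := ih (d1.insert ((l.length : Int), y) "\n") (y + 1) hbelow2
    rw [show pvOuterF (d, y) l = (d1.insert ((l.length : Int), y) "\n", y + 1) from rfl]
    constructor
    · rw [hitems, hins, hd1items]
      simp [pvBodyEnts]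
    · rw [hsnd]
      simp only [List.length_cons]
      push_cast
      ring

-- A's port computes the flat entries
theorem pvAEq (chaine : String) :
    creer_labyrinthe_depuis_chaine chaine
      = (pvFlat 0 0 chaine.toList).map (fun p => (p.1.1, p.1.2, p.2)) := by
  show ((chaine.toList.foldl pvStepA (PySem.Dict.empty, 0, 0)).1.items).map
      (fun p => (p.1.1, p.1.2, p.2)) = _
  rw [pvFoldA chaine.toList PySem.Dict.empty 0 0 (by simp [PySem.Dict.empty])]
  simp [PySem.Dict.empty]

-- B's port computes the same flat entries
theorem pvBEq (chaine : String) :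
    creer_labyrinthe_depuis_chaine_alt chaine
      = (pvFlat 0 0 chaine.toList).map (fun p => (p.1.1, p.1.2, p.2)) := by
  have hlines : PySem.Chars.splitOn chaine.toList ['\n'] = pvSplitNl [] chaine.toList :=
    pvSplitOn_eq chaine.toList
  have hne : PySem.Chars.splitOn chaine.toList ['\n'] ≠ [] := by
    rw [hlines]; exact pvSplitNl_ne_nil chaine.toList []
  show ((PySem.List.enumerate
      (PySem.List.pyGetD (PySem.Chars.splitOn chaine.toList ['\n']) (-1) []) 0).foldl
      (pvInnerF ((PySem.List.slice (PySem.Chars.splitOn chaine.toList ['\n']) none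
          (some (-1))).foldl pvOuterF (PySem.Dict.empty, 0)).2)
      ((PySem.List.slice (PySem.Chars.splitOn chaine.toList ['\n']) none
          (some (-1))).foldl pvOuterF (PySem.Dict.empty, 0)).1).items.map
      (fun p => (p.1.1, p.1.2, p.2)) = _
  rw [PySem.List.slice_to_neg_one, PySem.List.pyGetD_neg_one _ [] hne]
  obtain ⟨houtItems, houtSnd⟩ :=
    pvFoldOuter (PySem.Chars.splitOn chaine.toList ['\n']).dropLast PySem.Dict.empty 0
      (by simp [PySem.Dict.empty])
  rw [houtSnd]
  rw [pvFoldInner ((PySem.Chars.splitOn chaine.toList ['\n']).getLast hne) 0 _ _ ?below]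
  case below =>
    intro p hp
    rw [houtItems] at hp
    simp only [PySem.Dict.empty, List.nil_append] at hp
    left
    have := pvBodyEnts_key _ 0 p hp
    omega
  rw [houtItems]
  simp only [PySem.Dict.empty, List.nil_append]
  congr 1
  have hdec := pvEncLines_decomp (PySem.Chars.splitOn chaine.toList ['\n']) 0 hne
  rw [zero_add] at hdec ⊢
  rw [← hdec, hlines, pvEncLines_splitNl chaine.toList [] 0]
  simp [pvLineEnts]

-- ===== VERDICT (by name: the statement is the Claim_ definition above) =====
theorem creer_labyrinthe_depuis_chaine_spec : Claim_equal_creer_labyrinthe_depuis_chaine := by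
  intro chaine _
  unfold Spec_creer_labyrinthe_depuis_chaine
  rw [pvAEq, pvBEq]
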